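-- pv_equiv track=rewrite | github.com/temnoon/rho | api/archive_main_original.py | generate_llm_commentary
-- ===== SOURCE A (Python) =====
-- def generate_llm_commentary(chunk_text: str, chunk_index: int, book_context: dict) -> str:
--     """Generate LLM commentary/reflection on a chunk"""
--     # Simplified commentary generation - in practice, use a real LLM
--     title = book_context.get("title", "")
--     author = book_context.get("author", "")
--
--     # Analyze key elements in the chunk
--     commentary_elements = []
--
--     if any(word in chunk_text.lower() for word in ['said', 'asked', 'replied', '"', "'"]):
--         commentary_elements.append("dialogue_present")
--     if any(word in chunk_text.lower() for word in ['suddenly', 'then', 'next', 'after']):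
--         commentary_elements.append("narrative_progression")
--     if any(word in chunk_text.lower() for word in ['felt', 'thought', 'wondered', 'seemed']):
--         commentary_elements.append("introspection")
--     if any(word in chunk_text.lower() for word in ['beautiful', 'dark', 'bright', 'strange']):
--         commentary_elements.append("atmospheric")
--
--     # Generate contextual commentary
--     commentary_templates = {
--         "dialogue_present": f"Character voices emerge distinctly here, revealing personality through speech patterns.",
--         "narrative_progression": f"The story momentum shifts - this feels like a pivotal moment in {title}.",
--         "introspection": f"Deep psychological insight - {author}'s exploration of inner experience.",
--         "atmospheric": f"Rich sensory detail that establishes mood and setting effectively."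
--     }
--
--     if commentary_elements:
--         primary_element = commentary_elements[0]
--         commentary = commentary_templates.get(primary_element, "Significant narrative development.")
--     else:
--         commentary = f"Foundational text that builds the world of {title}."
--
--     # Add reading position context
--     if chunk_index < 10:
--         commentary += " [Early establishment phase]"
--     elif chunk_index % 20 == 0:  # Every 20th chunk
--         commentary += " [Potential turning point]"
--
--     return commentary
-- ===== SOURCE B (Python) =====
-- def generate_llm_commentary(chunk_text: str, chunk_index: int, book_context: dict) -> str:
--     title = book_context.get("title", "")
--     author = book_context.get("author", "")
--     text = chunk_text.lower()
--     # flat keyword -> priority table; the chosen category is the MINIMUM priority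
--     # among all keywords that occur in the text (0 beats 1 beats 2 beats 3)
--     priority = {'said': 0, 'asked': 0, 'replied': 0, '"': 0, "'": 0,
--                 'suddenly': 1, 'then': 1, 'next': 1, 'after': 1,
--                 'felt': 2, 'thought': 2, 'wondered': 2, 'seemed': 2,
--                 'beautiful': 3, 'dark': 3, 'bright': 3, 'strange': 3}
--     hits = [p for w, p in priority.items() if w in text]
--     best = min(hits) if hits else -1
--     if best == 0:
--         commentary = "Character voices emerge distinctly here, revealing personality through speech patterns."
--     elif best == 1:
--         commentary = f"The story momentum shifts - this feels like a pivotal moment in {title}."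
--     elif best == 2:
--         commentary = f"Deep psychological insight - {author}'s exploration of inner experience."
--     elif best == 3:
--         commentary = "Rich sensory detail that establishes mood and setting effectively."
--     else:
--         commentary = f"Foundational text that builds the world of {title}."
--     if chunk_index < 10:
--         commentary += " [Early establishment phase]"
--     elif chunk_index % 20 == 0:
--         commentary += " [Potential turning point]"
--     return commentary
-- ===== Notes on version B (the rewrite author's own statement) =====
-- stated objective: alternative
-- what changed: Replaces A's four staged flag-accumulation checks plus a tag->template dict lookup on the first flag with a flat keyword->priority table: collect the priorities of all keywords occurring in the lowercased text and take their MINIMUM (min of hits, -1 sentinel when empty) to select the template; correct because A's chosen tag is the first of the four groups in order, i.e. the minimum group index among matched keywords.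
import Mathlib
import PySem

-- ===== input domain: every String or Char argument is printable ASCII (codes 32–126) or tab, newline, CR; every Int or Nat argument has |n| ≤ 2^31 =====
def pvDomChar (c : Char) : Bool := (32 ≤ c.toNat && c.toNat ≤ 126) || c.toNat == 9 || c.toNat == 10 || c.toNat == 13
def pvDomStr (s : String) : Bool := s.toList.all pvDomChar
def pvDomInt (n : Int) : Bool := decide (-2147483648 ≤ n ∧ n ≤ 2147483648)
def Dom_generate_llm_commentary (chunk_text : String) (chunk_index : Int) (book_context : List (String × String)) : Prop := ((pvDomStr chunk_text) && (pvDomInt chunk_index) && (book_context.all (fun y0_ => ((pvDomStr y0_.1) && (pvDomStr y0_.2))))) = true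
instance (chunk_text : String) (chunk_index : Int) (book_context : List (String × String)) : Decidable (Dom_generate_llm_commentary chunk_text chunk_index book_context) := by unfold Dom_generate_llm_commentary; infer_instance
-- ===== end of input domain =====

-- B replaces A's four staged flag checks + tag-dict lookup by a flat keyword->priority table:
-- the category is the MINIMUM priority among all keywords occurring in the text (simpler decomposition).


-- ===== PORT A =====
def generate_llm_commentary (chunk_text : String) (chunk_index : Int) (book_context : List (String × String)) : String :=
  let title := PySem.Dict.getD (PySem.Dict.mk book_context) "title" ""
  let author := PySem.Dict.getD (PySem.Dict.mk book_context) "author" ""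
  let ce0 : List String := []
  let ce1 := if (["said", "asked", "replied", "\"", "'"].any
      (fun w => PySem.Str.isIn w (PySem.Str.lower chunk_text))) then ce0 ++ ["dialogue_present"] else ce0
  let ce2 := if (["suddenly", "then", "next", "after"].any
      (fun w => PySem.Str.isIn w (PySem.Str.lower chunk_text))) then ce1 ++ ["narrative_progression"] else ce1
  let ce3 := if (["felt", "thought", "wondered", "seemed"].any
      (fun w => PySem.Str.isIn w (PySem.Str.lower chunk_text))) then ce2 ++ ["introspection"] else ce2
  let ce4 := if (["beautiful", "dark", "bright", "strange"].any
      (fun w => PySem.Str.isIn w (PySem.Str.lower chunk_text))) then ce3 ++ ["atmospheric"] else ce3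
  let templates : PySem.Dict String String := PySem.Dict.mk
    [("dialogue_present", "Character voices emerge distinctly here, revealing personality through speech patterns."),
     ("narrative_progression", "The story momentum shifts - this feels like a pivotal moment in " ++ title ++ "."),
     ("introspection", "Deep psychological insight - " ++ author ++ "'s exploration of inner experience."),
     ("atmospheric", "Rich sensory detail that establishes mood and setting effectively.")]
  let commentary :=
    match ce4 with
    | [] => "Foundational text that builds the world of " ++ title ++ "."
    | primary :: _ => PySem.Dict.getD templates primary "Significant narrative development."
  if chunk_index < 10 then commentary ++ " [Early establishment phase]"
  else if PySem.Int.mod chunk_index 20 == 0 then commentary ++ " [Potential turning point]"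
  else commentary

-- ===== PORT B =====
-- the flat keyword -> priority dict of Source B
def pvPriority : List (String × Int) :=
  [("said", 0), ("asked", 0), ("replied", 0), ("\"", 0), ("'", 0),
   ("suddenly", 1), ("then", 1), ("next", 1), ("after", 1),
   ("felt", 2), ("thought", 2), ("wondered", 2), ("seemed", 2),
   ("beautiful", 3), ("dark", 3), ("bright", 3), ("strange", 3)]

def generate_llm_commentary_alt (chunk_text : String) (chunk_index : Int) (book_context : List (String × String)) : String :=
  let title := PySem.Dict.getD (PySem.Dict.mk book_context) "title" ""
  let author := PySem.Dict.getD (PySem.Dict.mk book_context) "author" ""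
  let text := PySem.Str.lower chunk_text
  -- [p for w, p in priority.items() if w in text]
  let hits : List Int :=
    (((PySem.Dict.mk pvPriority).items.filter (fun wp => PySem.Str.isIn wp.1 text)).map (fun wp => wp.2))
  -- min(hits) if hits else -1
  let best : Int := match PySem.List.min? hits (fun x => x) with
    | some m => m
    | none => -1
  let commentary :=
    if best == 0 then "Character voices emerge distinctly here, revealing personality through speech patterns."
    else if best == 1 then "The story momentum shifts - this feels like a pivotal moment in " ++ title ++ "."
    else if best == 2 then "Deep psychological insight - " ++ author ++ "'s exploration of inner experience."
    else if best == 3 then "Rich sensory detail that establishes mood and setting effectively."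
    else "Foundational text that builds the world of " ++ title ++ "."
  if chunk_index < 10 then commentary ++ " [Early establishment phase]"
  else if PySem.Int.mod chunk_index 20 == 0 then commentary ++ " [Potential turning point]"
  else commentary

-- ===== PRECONDITION & SPEC =====
def Spec_generate_llm_commentary (chunk_text : String) (chunk_index : Int) (book_context : List (String × String)) (out : String) : Prop := out = generate_llm_commentary_alt chunk_text chunk_index book_context
instance (chunk_text : String) (chunk_index : Int) (book_context : List (String × String)) (out : String) : Decidable (Spec_generate_llm_commentary chunk_text chunk_index book_context out) := by unfold Spec_generate_llm_commentary; infer_instance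

-- ===== CLAIM (what is proved, stated in full; the proofs are below) =====
def Claim_equal_generate_llm_commentary : Prop := ∀ (chunk_text : String) (chunk_index : Int) (book_context : List (String × String)), Dom_generate_llm_commentary chunk_text chunk_index book_context → Spec_generate_llm_commentary chunk_text chunk_index book_context (generate_llm_commentary chunk_text chunk_index book_context)

-- ===== LEMMAS AND PROOFS =====

-- one priority group of the flat table: filter+project yields a constant list of length countP
theorem pv_group_part (ws : List String) (i : Int) (t : String) :
    (((ws.map (fun w => (w, i))).filter (fun wp => PySem.Str.isIn wp.1 t)).map (fun wp => wp.2))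
      = List.replicate (ws.countP (fun w => PySem.Str.isIn w t)) i := by
  induction ws with
  | nil => rfl
  | cons w ws ih =>
      rcases Bool.eq_false_or_eq_true (PySem.Str.isIn w t) with h | h <;>
        simp only [List.map_cons, List.filter_cons, List.countP_cons, h, if_true, if_false,
          Nat.add_zero, List.replicate_succ, ih, Bool.false_eq_true]

theorem pv_foldl_min_const (l : List Int) (a : Int) (h : ∀ x ∈ l, a ≤ x) :
    l.foldl min a = a := by
  induction l generalizing a with
  | nil => rfl
  | cons x l ih =>
      have hx : min a x = a := min_eq_left (h x (by simp))
      simpa [hx] using ih a (fun y hy => h y (by simp [hy]))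

theorem pv_min?_graded (c0 c1 c2 c3 : Nat) :
    PySem.List.min?
      (List.replicate c0 (0:Int) ++ List.replicate c1 1 ++ List.replicate c2 2 ++ List.replicate c3 3)
      (fun x => x)
      = (if c0 ≠ 0 then some 0 else if c1 ≠ 0 then some 1
         else if c2 ≠ 0 then some 2 else if c3 ≠ 0 then some 3 else none) := by
  have mem_bound : ∀ (c : Nat) (i : Int) (x : Int), x ∈ List.replicate c i → x = i := by
    intro c i x hx; exact List.eq_of_mem_replicate hx
  cases c0 with
  | succ n =>
      rw [List.replicate_succ]
      simp only [List.cons_append, PySem.List.min?_id_cons]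
      rw [pv_foldl_min_const]
      · simp
      · intro x hx
        simp only [List.mem_append, List.mem_replicate] at hx
        rcases hx with ((⟨_, h⟩ | ⟨_, h⟩) | ⟨_, h⟩) | ⟨_, h⟩ <;> omega
  | zero =>
    simp only [List.replicate_zero, List.nil_append]
    cases c1 with
    | succ n =>
        rw [List.replicate_succ]
        simp only [List.cons_append, PySem.List.min?_id_cons]
        rw [pv_foldl_min_const]
        · simp
        · intro x hx
          simp only [List.mem_append, List.mem_replicate] at hx
          rcases hx with (⟨_, h⟩ | ⟨_, h⟩) | ⟨_, h⟩ <;> omega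
    | zero =>
      simp only [List.replicate_zero, List.nil_append]
      cases c2 with
      | succ n =>
          rw [List.replicate_succ]
          simp only [List.cons_append, PySem.List.min?_id_cons]
          rw [pv_foldl_min_const]
          · simp
          · intro x hx
            simp only [List.mem_append, List.mem_replicate] at hx
            rcases hx with ⟨_, h⟩ | ⟨_, h⟩ <;> omega
      | zero =>
        simp only [List.replicate_zero, List.nil_append, ne_eq, not_true_eq_false, if_false]
        cases c3 with
        | succ n =>
            rw [List.replicate_succ]
            simp only [PySem.List.min?_id_cons]
            rw [pv_foldl_min_const]
            · simp
            · intro x hx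
              have := List.eq_of_mem_replicate hx; omega
        | zero => rfl

-- the flat table splits into the four groups of A, in order
theorem pv_priority_split :
    (PySem.Dict.mk pvPriority).items
      = (["said", "asked", "replied", "\"", "'"].map (fun w => (w, (0:Int))))
        ++ (["suddenly", "then", "next", "after"].map (fun w => (w, 1)))
        ++ (["felt", "thought", "wondered", "seemed"].map (fun w => (w, 2)))
        ++ (["beautiful", "dark", "bright", "strange"].map (fun w => (w, 3))) := rfl

-- B's hits list in replicate form
theorem pv_hits_eq (t : String) :
    (((PySem.Dict.mk pvPriority).items.filter (fun wp => PySem.Str.isIn wp.1 t)).map (fun wp => wp.2))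
      = List.replicate (["said", "asked", "replied", "\"", "'"].countP (fun w => PySem.Str.isIn w t)) (0:Int)
        ++ List.replicate (["suddenly", "then", "next", "after"].countP (fun w => PySem.Str.isIn w t)) 1
        ++ List.replicate (["felt", "thought", "wondered", "seemed"].countP (fun w => PySem.Str.isIn w t)) 2
        ++ List.replicate (["beautiful", "dark", "bright", "strange"].countP (fun w => PySem.Str.isIn w t)) 3 := by
  rw [pv_priority_split]
  simp only [List.filter_append, List.map_append]
  rw [pv_group_part, pv_group_part, pv_group_part, pv_group_part]

theorem pv_countP_ne_zero_iff (ws : List String) (p : String → Bool) :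
    ws.countP p ≠ 0 ↔ ws.any p = true := by
  rw [← Nat.pos_iff_ne_zero, List.countP_pos_iff, List.any_eq_true]

-- ===== VERDICT (by name: the statement is the Claim_ definition above) =====
theorem generate_llm_commentary_spec : Claim_equal_generate_llm_commentary := by
  intro chunk_text chunk_index book_context _
  unfold Spec_generate_llm_commentary generate_llm_commentary generate_llm_commentary_alt
  dsimp only
  rw [pv_hits_eq (PySem.Str.lower chunk_text), pv_min?_graded]
  by_cases h0 : ["said", "asked", "replied", "\"", "'"].any (fun w => PySem.Str.isIn w (PySem.Str.lower chunk_text)) = true <;>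
  by_cases h1 : ["suddenly", "then", "next", "after"].any (fun w => PySem.Str.isIn w (PySem.Str.lower chunk_text)) = true <;>
  by_cases h2 : ["felt", "thought", "wondered", "seemed"].any (fun w => PySem.Str.isIn w (PySem.Str.lower chunk_text)) = true <;>
  by_cases h3 : ["beautiful", "dark", "bright", "strange"].any (fun w => PySem.Str.isIn w (PySem.Str.lower chunk_text)) = true <;>
    simp only [pv_countP_ne_zero_iff, h0, h1, h2, h3, if_true] <;> rfl
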